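-- pv_equiv track=rewrite | github.com/turtiesio/mac-clean-install-setup | utils/utils_zsh.py | _find_plugin_declaration
-- ===== SOURCE A (Python) =====
-- from typing import List, Optional
--
-- def _find_plugin_declaration(lines: List[str]) -> Optional[tuple[int, int]]:
--     """Find the start and end indices of the plugins declaration.
--
--     Args:
--         lines: List of lines from .zshrc
--
--     Returns:
--         Tuple of (start_index, end_index) or None if not found
--     """
--     for i, line in enumerate(lines):
--         if line.strip().startswith("plugins="):
--             start_index = i
--
--             # Check if it's a single-line declaration
--             if ")" in line:
--                 return (start_index, i)
--
--             # Multi-line declaration: find the closing parenthesis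
--             for j in range(i + 1, len(lines)):
--                 if ")" in lines[j]:
--                     return (start_index, j)
--
--             # No closing parenthesis found
--             break
--
--     return None
-- ===== SOURCE B (Python) =====
-- from typing import List, Optional
--
--
-- def _find_plugin_declaration(lines: List[str]) -> Optional[tuple[int, int]]:
--     # Backward pass: precompute next_close[i] = index of the nearest line at or
--     # after i that contains ")" (None if there is none), built back-to-front.
--     next_close = []
--     nxt = None
--     for i, line in reversed(list(enumerate(lines))):
--         if ")" in line:
--             nxt = i
--         next_close.append(nxt)
--     next_close.reverse()
--     # Forward pass: at the first plugins= line, read the answer off the table.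
--     for i, line in enumerate(lines):
--         if line.strip().startswith("plugins="):
--             nc = next_close[i]
--             return None if nc is None else (i, nc)
--     return None
-- ===== Notes on version B (the rewrite author's own statement) =====
-- stated objective: alternative
-- what changed: Replaces A's on-demand nested forward scan by a precomputed suffix table: a backward pass builds next_close[i] (nearest line at or after i containing ')'), and a single forward pass reads the answer off the table at the first plugins= line.
import Mathlib
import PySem

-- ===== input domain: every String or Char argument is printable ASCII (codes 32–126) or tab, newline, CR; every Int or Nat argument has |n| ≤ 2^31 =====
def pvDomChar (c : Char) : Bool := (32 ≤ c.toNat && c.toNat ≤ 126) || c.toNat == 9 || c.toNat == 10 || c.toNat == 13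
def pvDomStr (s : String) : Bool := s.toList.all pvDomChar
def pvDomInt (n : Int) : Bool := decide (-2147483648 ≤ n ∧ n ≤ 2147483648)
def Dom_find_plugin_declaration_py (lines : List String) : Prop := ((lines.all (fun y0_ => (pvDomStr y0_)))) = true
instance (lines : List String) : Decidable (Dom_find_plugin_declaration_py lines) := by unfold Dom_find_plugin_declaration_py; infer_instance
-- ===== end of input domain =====

-- B replaces A's on-demand nested forward scan by a backward-built next-close suffix table plus one forward lookup pass; objective: alternative.


-- ===== PORT A =====
-- inner loop: 'for j in range(i+1, len(lines)): if ")" in lines[j]: return (start_index, j)'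
-- (pyGetD is exact here: every j produced by pyRange (i+1) len 1 is in range)
def pvAClose (lines : List String) : List Int → Option Int
  | [] => none
  | j :: rest =>
    if PySem.Str.isIn ")" (PySem.List.pyGetD lines j "") then some j
    else pvAClose lines rest

-- outer loop over enumerate(lines); 'break' then 'return None' = none
def pvAGo (lines : List String) : List (Int × String) → Option (Int × Int)
  | [] => none
  | (i, line) :: rest =>
    if PySem.Str.startswith (PySem.Str.strip line) "plugins=" then
      if PySem.Str.isIn ")" line then some (i, i)
      else (pvAClose lines (PySem.List.pyRange (i + 1) (lines.length : Int) 1)).map (fun j => (i, j))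
    else pvAGo lines rest

def find_plugin_declaration_py (lines : List String) : Option (Int × Int) :=
  pvAGo lines (PySem.List.enumerate lines 0)

-- ===== PORT B =====
-- backward pass over reversed(list(enumerate(lines))), state = (next_close-so-far, nxt)
def pvBack : List (Int × String) → List (Option Int) × Option Int → List (Option Int) × Option Int
  | [], st => st
  | (i, line) :: rest, (acc, nxt) =>
    let nxt' := if PySem.Str.isIn ")" line then some i else nxt
    pvBack rest (acc ++ [nxt'], nxt')

-- forward pass: at the first plugins= line read next_close[i] (i is always in range)
def pvLook (nc : List (Option Int)) : List (Int × String) → Option (Int × Int)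
  | [] => none
  | (i, line) :: rest =>
    if PySem.Str.startswith (PySem.Str.strip line) "plugins=" then
      match PySem.List.pyGetD nc i none with
      | none => none
      | some j => some (i, j)
    else pvLook nc rest

def find_plugin_declaration_py_alt (lines : List String) : Option (Int × Int) :=
  let nc := (pvBack ((PySem.List.enumerate lines 0).reverse) ([], none)).1.reverse
  pvLook nc (PySem.List.enumerate lines 0)

-- ===== PRECONDITION & SPEC =====
def Spec_find_plugin_declaration_py (lines : List String) (out : Option (Int × Int)) : Prop := out = find_plugin_declaration_py_alt lines
instance (lines : List String) (out : Option (Int × Int)) : Decidable (Spec_find_plugin_declaration_py lines out) := by unfold Spec_find_plugin_declaration_py; infer_instance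

-- ===== CLAIM (what is proved, stated in full; the proofs are below) =====
def Claim_equal_find_plugin_declaration_py : Prop := ∀ (lines : List String), Dom_find_plugin_declaration_py lines → Spec_find_plugin_declaration_py lines (find_plugin_declaration_py lines)

-- ===== LEMMAS AND PROOFS =====

-- proof-side characterisation: (pvFcs ls k).1 = list of "nearest close at or after" values
-- for the suffix ls starting at index k; .2 = that value at index k itself (none for []).
def pvFcs : List String → Int → List (Option Int) × Option Int
  | [], _ => ([], none)
  | l :: rest, k =>
    let p := pvFcs rest (k + 1)
    let cur := if PySem.Str.isIn ")" l then some k else p.2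
    (cur :: p.1, cur)

lemma pvBack_append (as bs : List (Int × String)) (st : List (Option Int) × Option Int) :
    pvBack (as ++ bs) st = pvBack bs (pvBack as st) := by
  induction as generalizing st with
  | nil => rfl
  | cons x rest ih =>
    obtain ⟨i, line⟩ := x
    obtain ⟨acc, nxt⟩ := st
    simp [pvBack, ih]

-- the backward pass computes pvFcs (output list reversed)
lemma pvBack_eq_pvFcs (ls : List String) :
    ∀ (k : Int) (acc : List (Option Int)),
    pvBack ((PySem.List.enumerate ls k).reverse) (acc, none) =
      (acc ++ (pvFcs ls k).1.reverse, (pvFcs ls k).2) := by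
  induction ls with
  | nil => intro k acc; simp [PySem.List.enumerate_nil, pvBack, pvFcs]
  | cons l rest ih =>
    intro k acc
    rw [PySem.List.enumerate_cons, List.reverse_cons, pvBack_append, ih]
    simp [pvBack, pvFcs]

-- indexing into the pvFcs list
lemma pvFcs_getD (ls : List String) :
    ∀ (j : Nat) (k : Int), j < ls.length →
    ((pvFcs ls k).1).getD j none = (pvFcs (ls.drop j) (k + (j : Int))).2 := by
  induction ls with
  | nil => intro j k h; simp at h
  | cons l rest ih =>
    intro j k h
    cases j with
    | zero => simp [pvFcs]
    | succ j' =>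
      have := ih j' (k + 1) (by simpa using h)
      simp only [pvFcs, List.getD_cons_succ, List.drop_succ_cons]
      rw [this]
      have hx : (1 : Int) + k + (j' : Int) = k + ((1 + j' : Nat) : Int) := by push_cast; ring
      rw [show k + 1 + (j' : Int) = 1 + k + (j' : Int) by ring, hx, Nat.add_comm]

-- A's inner scan from index j equals the pvFcs value at j
lemma pvAClose_eq_pvFcs (lines : List String) :
    ∀ (suf : List String) (j : Nat), suf = lines.drop j →
    pvAClose lines (PySem.List.pyRange (j : Int) (lines.length : Int) 1) =
      (pvFcs suf (j : Int)).2 := by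
  intro suf
  induction suf with
  | nil =>
    intro j hj
    have hle : lines.length ≤ j := by
      by_contra h
      have := hj.symm
      rw [List.drop_eq_nil_iff] at this
      omega
    rw [PySem.List.pyRange_one_eq_nil (by exact_mod_cast hle)]
    simp [pvAClose, pvFcs]
  | cons l rest ih =>
    intro j hj
    have hjlt : j < lines.length := by
      by_contra h
      rw [List.drop_eq_nil_of_le (by omega)] at hj
      simp at hj
    have hline : lines[j]? = some l := by
      have := congrArg (List.head?) hj
      rw [List.head?_drop] at this
      exact this.symm
    have hget : PySem.List.pyGetD lines (j : Int) "" = l := by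
      rw [PySem.List.pyGetD_natCast]
      simp [List.getD_eq_getElem?_getD, hline]
    rw [PySem.List.pyRange_one_cons (by exact_mod_cast hjlt)]
    have hrest : rest = lines.drop (j + 1) := by
      rw [← List.tail_drop, ← hj]; rfl
    have hcast : ((j : Int) + 1) = ((j + 1 : Nat) : Int) := by push_cast; ring
    simp only [pvAClose, hget, pvFcs]
    rw [hcast, ih (j + 1) hrest]

-- main: A's outer loop on any enumerated suffix equals B's lookup loop on it
lemma pvMain (lines : List String) :
    ∀ (suf : List String) (k : Nat), suf = lines.drop k →
    pvAGo lines (PySem.List.enumerate suf (k : Int)) =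
      pvLook (pvFcs lines 0).1 (PySem.List.enumerate suf (k : Int)) := by
  intro suf
  induction suf with
  | nil => intro k _; simp [PySem.List.enumerate_nil, pvAGo, pvLook]
  | cons line rest ih =>
    intro k hk
    have hklt : k < lines.length := by
      by_contra h
      rw [List.drop_eq_nil_of_le (by omega)] at hk
      simp at hk
    rw [PySem.List.enumerate_cons]
    by_cases hs : PySem.Str.startswith (PySem.Str.strip line) "plugins=" = true
    · simp only [pvAGo, pvLook, hs, if_pos]
      have hnc : PySem.List.pyGetD (pvFcs lines 0).1 (k : Int) none =
          (pvFcs (lines.drop k) (k : Int)).2 := by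
        rw [PySem.List.pyGetD_natCast, pvFcs_getD lines k 0 hklt]
        norm_num
      rw [hnc]
      have hdk : lines.drop k = line :: rest := hk.symm
      rw [hdk]
      by_cases hc : PySem.Chars.isIn [')'] line.toList = true
      · simp [pvFcs, hc]
      · have hcast : ((k : Int) + 1) = ((k + 1 : Nat) : Int) := by push_cast; ring
        have hrest : rest = lines.drop (k + 1) := by
          rw [← List.tail_drop, ← hk]; rfl
        simp only [pvFcs]
        rw [hcast, pvAClose_eq_pvFcs lines rest (k + 1) hrest]
        cases (pvFcs rest ((k + 1 : Nat) : Int)).2 <;> simp [hc]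
    · simp only [pvAGo, pvLook, hs, if_neg, Bool.false_eq_true, not_false_iff]
      have hcast : ((k : Int) + 1) = ((k + 1 : Nat) : Int) := by push_cast; ring
      rw [hcast]
      exact ih (k + 1) (by rw [← List.tail_drop, ← hk]; rfl)

-- ===== VERDICT (by name: the statement is the Claim_ definition above) =====
theorem find_plugin_declaration_py_spec : Claim_equal_find_plugin_declaration_py := by
  intro lines _
  unfold Spec_find_plugin_declaration_py find_plugin_declaration_py find_plugin_declaration_py_alt
  rw [pvBack_eq_pvFcs lines 0 []]
  simp only [List.nil_append, List.reverse_reverse]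
  exact pvMain lines lines 0 (by simp)
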